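-- pv_equiv track=rewrite | github.com/dainshon/CODING | 백준/Silver/3085. 사탕 게임/사탕 게임.py | check
-- ===== SOURCE A (Python) =====
-- def check(arr):
--     max_count = 0
--     count = 1
--     for i in range(1, len(arr)):
--         if(arr[i-1] == arr[i]):
--             count+=1
--         else:
--             max_count = max(max_count, count)
--             count = 1
--     max_count = max(max_count, count)
--     return max_count
-- ===== SOURCE B (Python) =====
-- def check(arr):
--     # Group the array into maximal runs of equal elements first (span-based
--     # grouping: each outer step consumes one whole run), then reduce: the
--     # answer is the max run length, with 1 for the empty array (matching A).
--     lengths = []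
--     i = 0
--     n = len(arr)
--     while i < n:
--         j = i + 1
--         while j < n and arr[j] == arr[i]:
--             j += 1
--         lengths.append(j - i)
--         i = j
--     return max(lengths, default=1)
-- ===== Notes on version B (the rewrite author's own statement) =====
-- stated objective: alternative
-- what changed: B decomposes the array into maximal runs of equal elements (recursive span-based grouping) and then takes the maximum run length with default 1, instead of A's single scan maintaining a running counter and running maximum with a per-element branch.
import Mathlib
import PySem

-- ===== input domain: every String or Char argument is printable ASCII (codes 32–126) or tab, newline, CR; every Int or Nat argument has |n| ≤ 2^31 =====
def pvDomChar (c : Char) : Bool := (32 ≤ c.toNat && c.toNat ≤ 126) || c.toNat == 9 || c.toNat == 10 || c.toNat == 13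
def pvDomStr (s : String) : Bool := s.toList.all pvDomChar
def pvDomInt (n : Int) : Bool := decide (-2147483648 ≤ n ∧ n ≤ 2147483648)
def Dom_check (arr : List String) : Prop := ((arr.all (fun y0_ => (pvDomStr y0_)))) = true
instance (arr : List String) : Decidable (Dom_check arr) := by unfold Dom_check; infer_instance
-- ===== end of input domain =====

-- B groups the array into maximal runs of equal elements and maxes over run lengths
-- (alternative decomposition, same cost); A keeps a running counter + running max.

-- ===== PORT A =====
def check (arr : List String) : Int :=
  let st := (PySem.List.pyRange 1 (arr.length : Int) 1).foldl
      (fun (s : Int × Int) (i : Int) =>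
        if PySem.List.pyGet? arr (i - 1) = PySem.List.pyGet? arr i then (s.1, s.2 + 1)
        else (max s.1 s.2, 1))
      (0, 1)
  max st.1 st.2

-- ===== PORT B =====
-- run_lengths: the lengths of the maximal runs of equal consecutive elements
def runLens (arr : List String) : List Int :=
  match arr with
  | [] => []
  | a :: xs =>
    ((1 : Int) + (xs.takeWhile (· == a)).length) :: runLens (xs.dropWhile (· == a))
termination_by arr.length
decreasing_by
  simpa using Nat.lt_succ_of_le (List.length_dropWhile_le (· == a) xs)

def check_alt (arr : List String) : Int :=
  match runLens arr with
  | [] => 1                      -- max(…, default=1) on an empty sequence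
  | x :: xs => xs.foldl max x    -- max of a nonempty sequence

-- ===== PRECONDITION & SPEC =====
def Spec_check (arr : List String) (out : Int) : Prop := out = check_alt arr
instance (arr : List String) (out : Int) : Decidable (Spec_check arr out) := by unfold Spec_check; infer_instance

-- ===== CLAIM (what is proved, stated in full; the proofs are below) =====
def Claim_equal_check : Prop := ∀ (arr : List String), Dom_check arr → Spec_check arr (check arr)

-- ===== LEMMAS AND PROOFS =====

-- the loop body of A, expressed on an adjacent pair of elements
def stepP (s : Int × Int) (ab : String × String) : Int × Int :=
  if ab.1 = ab.2 then (s.1, s.2 + 1) else (max s.1 s.2, 1)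

-- A's indexed fold equals a fold over the list of adjacent pairs
theorem range_fold_eq_zip (xs : List String) (s : Int × Int) :
    (List.range (xs.length - 1)).foldl
      (fun p k => if xs[k]? = xs[k+1]? then (p.1, p.2 + 1) else (max p.1 p.2, (1 : Int)))
      s
    = (xs.zip xs.tail).foldl stepP s := by
  induction xs generalizing s with
  | nil => simp
  | cons a xs ih =>
    cases xs with
    | nil => simp
    | cons b t =>
      have h0 : (a :: b :: t).length - 1 = t.length + 1 := by simp
      rw [h0, List.range_succ_eq_map, List.foldl_cons, List.foldl_map]
      have hbody :
          (fun (p : Int × Int) (k : Nat) =>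
            if (a :: b :: t)[k+1]? = (a :: b :: t)[k+1+1]? then (p.1, p.2 + 1)
            else (max p.1 p.2, (1:Int)))
          = (fun (p : Int × Int) (k : Nat) =>
            if (b :: t)[k]? = (b :: t)[k+1]? then (p.1, p.2 + 1)
            else (max p.1 p.2, (1:Int))) := by
        funext p k
        simp
      have h1 : (b :: t).length - 1 = t.length := by simp
      rw [hbody, ← h1, ih]
      simp [stepP]

-- the pairs fold, finished with the trailing max, computes the runs maximum
theorem zip_fold_eq_runs (t : List String) (a : String) (m c : Int) :
    max (((a :: t).zip t).foldl stepP (m, c)).1 (((a :: t).zip t).foldl stepP (m, c)).2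
    = List.foldl max m ((c + ((t.takeWhile (· == a)).length : Int)) :: runLens (t.dropWhile (· == a))) := by
  induction t generalizing a m c with
  | nil => simp [runLens]
  | cons b s ih =>
    have hz : ((a :: b :: s).zip (b :: s)) = (a, b) :: ((b :: s).zip s) := by simp
    rw [hz, List.foldl_cons]
    by_cases hab : a = b
    · subst hab
      have hstep : stepP (m, c) (a, a) = (m, c + 1) := by simp [stepP]
      rw [hstep, ih]
      simp only [List.takeWhile_cons, List.dropWhile_cons, beq_self_eq_true, if_true,
        List.length_cons]
      have hc : (c + (((s.takeWhile (· == a)).length + 1 : Nat) : Int))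
          = (c + 1) + ((s.takeWhile (· == a)).length : Int) := by push_cast; ring
      rw [hc]
    · have hneg : (b == a) = false := by
        simp only [beq_eq_false_iff_ne, ne_eq]; exact fun h => hab h.symm
      have hstep : stepP (m, c) (a, b) = (max m c, 1) := by simp [stepP, hab]
      rw [hstep, ih]
      simp only [List.takeWhile_cons, List.dropWhile_cons, hneg, Bool.false_eq_true, if_false,
        List.length_nil, Nat.cast_zero, add_zero, List.foldl_cons, runLens]

theorem check_spec_aux (arr : List String) : check arr = check_alt arr := by
  cases arr with
  | nil => simp [check, check_alt, runLens]
  | cons a t =>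
    have hrange : check (a :: t)
        = max (((List.range ((a :: t).length - 1)).foldl
            (fun p k => if (a :: t)[k]? = (a :: t)[k+1]? then (p.1, p.2 + 1) else (max p.1 p.2, (1 : Int)))
            (0, 1)).1)
          (((List.range ((a :: t).length - 1)).foldl
            (fun p k => if (a :: t)[k]? = (a :: t)[k+1]? then (p.1, p.2 + 1) else (max p.1 p.2, (1 : Int)))
            (0, 1)).2) := by
      simp only [check, PySem.List.pyRange_one, List.foldl_map]
      have harg : ((((a :: t).length : Int)) - 1).toNat = (a :: t).length - 1 := by omega
      have hf : (fun (x : Int × Int) (y : Nat) =>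
          if PySem.List.pyGet? (a :: t) (1 + (y : Int) - 1) = PySem.List.pyGet? (a :: t) (1 + (y : Int))
          then (x.1, x.2 + 1) else (max x.1 x.2, (1 : Int)))
          = (fun (p : Int × Int) (k : Nat) =>
            if (a :: t)[k]? = (a :: t)[k+1]? then (p.1, p.2 + 1) else (max p.1 p.2, (1 : Int))) := by
        funext p k
        have e1 : (1 : Int) + (k : Int) - 1 = ((k : Nat) : Int) := by omega
        have e2 : (1 : Int) + (k : Int) = ((k + 1 : Nat) : Int) := by push_cast; ring
        rw [e1, e2, PySem.List.pyGet?_natCast, PySem.List.pyGet?_natCast]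
      rw [harg, hf]
    rw [hrange, range_fold_eq_zip, show (a :: t).tail = t from rfl, zip_fold_eq_runs]
    have hhead : runLens (a :: t)
        = ((1 : Int) + ((t.takeWhile (· == a)).length : Int)) :: runLens (t.dropWhile (· == a)) := by
      simp only [runLens]
    rw [check_alt, hhead]
    simp only [List.foldl_cons]
    have h0 : max (0 : Int) (1 + ((t.takeWhile (· == a)).length : Int))
        = 1 + ((t.takeWhile (· == a)).length : Int) := by omega
    rw [h0]

-- ===== VERDICT (by name: the statement is the Claim_ definition above) =====
theorem check_spec : Claim_equal_check := by
  intro arr _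
  unfold Spec_check
  exact check_spec_aux arr
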